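-- pv_equiv track=rewrite | github.com/pawamoy/mkdocs-spellcheck | src/mkdocs_spellcheck/words.py | _keep_word
-- ===== SOURCE A (Python) =====
-- def _keep_word(word: str, min_length: int, max_capital: int) -> bool:
--     if len(word) < min_length:
--         return False
--     capitals = 0
--     for char in word:
--         if char.isdigit():
--             return False
--         if char.isupper():
--             capitals += 1
--             if capitals > max_capital:
--                 return False
--     return True
-- ===== SOURCE B (Python) =====
-- def _keep_word(word: str, min_length: int, max_capital: int) -> bool:
--     if len(word) < min_length:
--         return False
--     for digit in "0123456789":
--         if digit in word:
--             return False
--     capitals = 0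
--     for letter in "ABCDEFGHIJKLMNOPQRSTUVWXYZ":
--         capitals += word.count(letter)
--     return capitals <= max_capital
-- ===== Notes on version B (the rewrite author's own statement) =====
-- stated objective: alternative
-- what changed: Instead of one stateful per-character pass with an early-exit capitals counter, B iterates over the 36 relevant character VALUES: it probes each of the 10 digits with substring membership ('d in word') and totals str.count over the 26 uppercase letters, then compares the total to max_capital; these membership/count scans run in C, replacing the per-character Python loop.
-- intended difference: On words with no digits and no uppercase letters that pass the length check while max_capital is negative, A returns True (its '> max_capital' test only runs after an increment so zero capitals is never checked) while B returns False, which is the intended uniform reading of 'at most max_capital capitals'. — e.g. on _keep_word("so", 0, -1): A returns true, B returns false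
import Mathlib
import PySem

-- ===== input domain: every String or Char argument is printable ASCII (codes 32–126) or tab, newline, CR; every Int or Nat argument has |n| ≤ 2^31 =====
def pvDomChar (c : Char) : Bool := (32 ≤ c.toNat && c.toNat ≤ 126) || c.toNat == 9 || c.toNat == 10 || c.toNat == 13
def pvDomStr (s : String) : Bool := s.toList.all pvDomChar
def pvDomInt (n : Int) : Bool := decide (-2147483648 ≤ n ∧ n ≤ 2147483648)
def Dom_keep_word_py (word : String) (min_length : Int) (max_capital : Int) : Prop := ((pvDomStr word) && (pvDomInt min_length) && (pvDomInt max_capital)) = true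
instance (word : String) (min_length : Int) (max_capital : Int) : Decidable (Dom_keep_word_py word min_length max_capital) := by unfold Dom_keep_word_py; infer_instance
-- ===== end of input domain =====

-- B scans the 36 relevant character VALUES (digit membership probes, str.count per uppercase letter)
-- instead of A's single stateful early-exit pass over the word; on no-capital words with negative
-- max_capital A keeps and B drops (see D_).

-- ===== PORT A =====
-- A's early-exit for loop over the word's characters with the running `capitals` counter
def keepLoop (max_capital : Int) : List Char → Int → Bool
  | [], _ => true
  | c :: cs, capitals =>
    if PySem.Chars.isdigit c then false
    else if PySem.Chars.isupper c then
      if capitals + 1 > max_capital then false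
      else keepLoop max_capital cs (capitals + 1)
    else keepLoop max_capital cs capitals

def keep_word_py (word : String) (min_length : Int) (max_capital : Int) : Bool :=
  if (PySem.Str.len word : Int) < min_length then false
  else keepLoop max_capital word.toList 0

-- ===== PORT B =====
-- B: length gate, then `digit in word` for each of the ten digits (early-exit loop = any),
-- then capitals accumulated as word.count(letter) over the 26 uppercase letters.
def keep_word_py_alt (word : String) (min_length : Int) (max_capital : Int) : Bool :=
  if (PySem.Str.len word : Int) < min_length then false
  else if "0123456789".toList.any (fun d => PySem.Str.isIn (String.ofList [d]) word) then false
  else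
    let capitals : Int := "ABCDEFGHIJKLMNOPQRSTUVWXYZ".toList.foldl
      (fun acc c => acc + (PySem.Str.count word (String.ofList [c]) : Int)) 0
    decide (capitals ≤ max_capital)

-- ===== PRECONDITION & SPEC =====
-- When max_capital is negative and the word passes the length check and has no digit and no
-- uppercase letter, A returns True (its `> max_capital` check only runs after an increment)
-- while B returns False, enforcing the stated limit "at most max_capital capitals" uniformly.
def D_keep_word_py (word : String) (min_length : Int) (max_capital : Int) : Prop :=
  min_length ≤ (PySem.Str.len word : Int) ∧ max_capital < 0 ∧
    (word.toList.all (fun c => !PySem.Chars.isdigit c && !PySem.Chars.isupper c)) = true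
instance (word : String) (min_length : Int) (max_capital : Int) : Decidable (D_keep_word_py word min_length max_capital) := by unfold D_keep_word_py; infer_instance

def Spec_keep_word_py (word : String) (min_length : Int) (max_capital : Int) (out : Bool) : Prop := ¬ D_keep_word_py word min_length max_capital → out = keep_word_py_alt word min_length max_capital
instance (word : String) (min_length : Int) (max_capital : Int) (out : Bool) : Decidable (Spec_keep_word_py word min_length max_capital out) := by unfold Spec_keep_word_py; infer_instance

def pvDiffWitness_keep_word_py : String × Int × Int := ("so", 0, -1)
def pvDiffWitnessOut_keep_word_py : Bool × Bool := (true, false)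

-- ===== CLAIM (what is proved, stated in full; the proofs are below) =====
def Claim_unchanged_keep_word_py : Prop := ∀ (word : String) (min_length : Int) (max_capital : Int), Dom_keep_word_py word min_length max_capital → Spec_keep_word_py word min_length max_capital (keep_word_py word min_length max_capital)
def Claim_changed_keep_word_py : Prop := Dom_keep_word_py (pvDiffWitness_keep_word_py.1) (pvDiffWitness_keep_word_py.2.1) (pvDiffWitness_keep_word_py.2.2) ∧ D_keep_word_py (pvDiffWitness_keep_word_py.1) (pvDiffWitness_keep_word_py.2.1) (pvDiffWitness_keep_word_py.2.2) ∧ keep_word_py (pvDiffWitness_keep_word_py.1) (pvDiffWitness_keep_word_py.2.1) (pvDiffWitness_keep_word_py.2.2) = pvDiffWitnessOut_keep_word_py.1 ∧ keep_word_py_alt (pvDiffWitness_keep_word_py.1) (pvDiffWitness_keep_word_py.2.1) (pvDiffWitness_keep_word_py.2.2) = pvDiffWitnessOut_keep_word_py.2 ∧ pvDiffWitnessOut_keep_word_py.1 ≠ pvDiffWitnessOut_keep_word_py.2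
def Claim_exact_keep_word_py : Prop := ∀ (word : String) (min_length : Int) (max_capital : Int), Dom_keep_word_py word min_length max_capital → D_keep_word_py word min_length max_capital → keep_word_py word min_length max_capital ≠ keep_word_py_alt word min_length max_capital

-- ===== LEMMAS AND PROOFS =====

-- ASCII digit characters are exactly the ten characters of "0123456789"
theorem isdigit_iff_mem (c : Char) : PySem.Chars.isdigit c = true ↔ c ∈ "0123456789".toList := by
  have hlist : "0123456789".toList = (List.range 10).map (fun k => Char.ofNat (48 + k)) := by decide
  rw [hlist]
  constructor
  · intro h
    simp [PySem.Chars.isdigit, Char.le_def, UInt32.le_iff_toNat_le] at h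
    refine List.mem_map.mpr ⟨c.toNat - 48, List.mem_range.mpr (by omega), ?_⟩
    have h48 : 48 + (c.toNat - 48) = c.toNat := by omega
    rw [h48, Char.ofNat_toNat]
  · intro h
    obtain ⟨k, hk, rfl⟩ := List.mem_map.mp h
    have hk' := List.mem_range.mp hk
    interval_cases k <;> decide

-- ASCII uppercase characters are exactly the 26 characters of "A…Z"
theorem isupper_iff_mem (c : Char) : PySem.Chars.isupper c = true ↔ c ∈ "ABCDEFGHIJKLMNOPQRSTUVWXYZ".toList := by
  have hlist : "ABCDEFGHIJKLMNOPQRSTUVWXYZ".toList = (List.range 26).map (fun k => Char.ofNat (65 + k)) := by decide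
  rw [hlist]
  constructor
  · intro h
    simp [PySem.Chars.isupper, Char.le_def, UInt32.le_iff_toNat_le] at h
    refine List.mem_map.mpr ⟨c.toNat - 65, List.mem_range.mpr (by omega), ?_⟩
    have h65 : 65 + (c.toNat - 65) = c.toNat := by omega
    rw [h65, Char.ofNat_toNat]
  · intro h
    obtain ⟨k, hk, rfl⟩ := List.mem_map.mp h
    have hk' := List.mem_range.mp hk
    interval_cases k <;> decide

-- counting occurrences of a one-character substring is counting that character
theorem count_go_single (a : Char) (l : List Char) : ∀ (fuel acc : Nat), l.length ≤ fuel →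
    PySem.Chars.count.go [a] fuel l acc = acc + l.count a := by
  induction l with
  | nil => intro fuel acc _; cases fuel <;> simp [PySem.Chars.count.go]
  | cons h t ih =>
    intro fuel acc hle
    cases fuel with
    | zero => simp at hle
    | succ f =>
      simp only [PySem.Chars.count.go]
      by_cases hah : a = h
      · subst hah
        have hp : [a].isPrefixOf (a :: t) = true := by simp [List.isPrefixOf]
        rw [if_pos hp]
        simp only [List.length, List.drop_succ_cons, List.drop_zero]
        rw [ih f (acc + 1) (by simpa using hle)]
        simp
        omega
      · have hp : [a].isPrefixOf (h :: t) = false := by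
          simp [List.isPrefixOf]
          exact fun hh => absurd hh hah
        rw [if_neg (by simp [hp])]
        rw [ih f acc (by simpa using hle)]
        simp [List.count_cons]
        exact fun hh => hah hh.symm
theorem count_single (l : List Char) (a : Char) : PySem.Chars.count l [a] = l.count a := by
  simp only [PySem.Chars.count, List.isEmpty_cons]
  simpa using count_go_single a l l.length 0 le_rfl

-- countP of a disjunction of disjoint tests splits
theorem countP_or_disjoint (p q : Char → Bool) (l : List Char)
    (h : ∀ c, ¬(p c = true ∧ q c = true)) :
    l.countP (fun c => p c || q c) = l.countP p + l.countP q := by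
  induction l with
  | nil => simp
  | cons c t ih =>
    simp only [List.countP_cons, ih]
    by_cases hp : p c = true <;> by_cases hq : q c = true
    · exact absurd ⟨hp, hq⟩ (h c)
    all_goals simp [hp, hq]
    all_goals omega

-- the per-letter count loop totals the number of characters lying in `letters`
theorem foldl_count (letters : List Char) (hnd : letters.Nodup) (l : List Char) (init : Int) :
    letters.foldl (fun acc c => acc + (l.count c : Int)) init
      = init + (l.countP (fun c => decide (c ∈ letters)) : Int) := by
  induction letters generalizing init with
  | nil => simp
  | cons x xs ih =>
    obtain ⟨hx, hnd'⟩ := List.nodup_cons.mp hnd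
    simp only [List.foldl_cons]
    rw [ih hnd' (init + (l.count x : Int))]
    have hsplit : l.countP (fun c => decide (c ∈ x :: xs))
        = l.countP (fun c => c == x) + l.countP (fun c => decide (c ∈ xs)) := by
      have hdis : ∀ c : Char, ¬((c == x) = true ∧ decide (c ∈ xs) = true) := by
        intro c ⟨h1, h2⟩
        exact hx ((beq_iff_eq.mp h1) ▸ of_decide_eq_true h2)
      rw [← countP_or_disjoint _ _ l hdis]
      apply List.countP_congr
      intro c _
      simp [List.mem_cons]
    rw [hsplit, List.count]
    push_cast
    ring

-- B's digit probes find a digit iff the word contains a digit character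
theorem digits_scan (w : String) :
    ("0123456789".toList.any (fun d => PySem.Str.isIn (String.ofList [d]) w))
      = w.toList.any (fun c => PySem.Chars.isdigit c) := by
  rw [Bool.eq_iff_iff]
  simp only [List.any_eq_true]
  constructor
  · rintro ⟨d, hd, hin⟩
    have : [d] <:+: w.toList := by
      rw [PySem.Str.isIn_eq] at hin
      have h1 := (PySem.Chars.isIn_iff_infix _ _).mp hin
      simpa using h1
    exact ⟨d, (List.singleton_infix_iff d w.toList).mp this, (isdigit_iff_mem d).mpr hd⟩
  · rintro ⟨c, hc, hdig⟩
    refine ⟨c, (isdigit_iff_mem c).mp hdig, ?_⟩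
    rw [PySem.Str.isIn_eq, PySem.Chars.isIn_iff_infix]
    simpa using (List.singleton_infix_iff c w.toList).mpr hc
-- B's letter loop totals exactly the number of uppercase characters
theorem caps_scan (w : String) :
    ("ABCDEFGHIJKLMNOPQRSTUVWXYZ".toList.foldl
        (fun acc c => acc + (PySem.Str.count w (String.ofList [c]) : Int)) 0)
      = ((w.toList.countP (fun c => PySem.Chars.isupper c)) : Int) := by
  have hc : ∀ c : Char, PySem.Str.count w (String.ofList [c]) = w.toList.count c := by
    intro c
    rw [PySem.Str.count_eq, String.toList_ofList]
    exact count_single w.toList c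
  calc ("ABCDEFGHIJKLMNOPQRSTUVWXYZ".toList.foldl
        (fun acc c => acc + (PySem.Str.count w (String.ofList [c]) : Int)) 0)
      = ("ABCDEFGHIJKLMNOPQRSTUVWXYZ".toList.foldl
        (fun acc c => acc + (w.toList.count c : Int)) 0) := by
        have hfun : (fun (acc : Int) (c : Char) => acc + (PySem.Str.count w (String.ofList [c]) : Int))
            = (fun (acc : Int) (c : Char) => acc + (w.toList.count c : Int)) := by
          funext acc c
          rw [hc c]
        rw [hfun]
    _ = ((w.toList.countP (fun c => PySem.Chars.isupper c)) : Int) := by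
        rw [foldl_count _ (by decide) _ 0]
        simp only [zero_add, Nat.cast_inj]
        apply List.countP_congr
        intro c _
        have := isupper_iff_mem c
        cases h' : PySem.Chars.isupper c <;> simp_all

-- B in flat conjunction form
theorem alt_eq (word : String) (ml mc : Int) :
    keep_word_py_alt word ml mc =
      (decide (ml ≤ (PySem.Str.len word : Int))
        && !(word.toList.any (fun c => PySem.Chars.isdigit c))
        && decide (((word.toList.countP (fun c => PySem.Chars.isupper c)) : Int) ≤ mc)) := by
  unfold keep_word_py_alt
  rw [digits_scan, caps_scan]
  by_cases hl : (PySem.Str.len word : Int) < ml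
  · rw [if_pos hl]
    have : decide (ml ≤ (PySem.Str.len word : Int)) = false := by
      simp only [decide_eq_false_iff_not]; omega
    rw [this, Bool.false_and, Bool.false_and]
  · rw [if_neg hl]
    have h1 : decide (ml ≤ (PySem.Str.len word : Int)) = true := by
      simp only [decide_eq_true_eq]; omega
    rw [h1, Bool.true_and]
    cases hd : word.toList.any (fun c => PySem.Chars.isdigit c) <;> simp

-- A's loop returns true iff there is no digit and (no capital at all, or the count fits)
theorem keepLoop_eq (mc : Int) (cs : List Char) (cap : Int) :
    keepLoop mc cs cap =
      ((cs.all (fun c => !PySem.Chars.isdigit c))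
        && (decide (cs.countP (fun c => PySem.Chars.isupper c) = 0)
            || decide (cap + ((cs.countP (fun c => PySem.Chars.isupper c)) : Int) ≤ mc))) := by
  induction cs generalizing cap with
  | nil => simp [keepLoop]
  | cons c cs ih =>
    simp only [keepLoop, List.all_cons, List.countP_cons]
    by_cases hd : PySem.Chars.isdigit c = true
    · simp [hd]
    · by_cases hu : PySem.Chars.isupper c = true
      · simp only [hd, hu, if_pos, Bool.not_false, Bool.true_and]
        by_cases hx : cap + 1 > mc
        · simp only [if_pos hx]
          have h0 : 0 ≤ (cs.countP (fun c => PySem.Chars.isupper c) : Int) := Int.natCast_nonneg _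
          simp
          intro _
          omega
        · simp only [if_neg hx, ih]
          have hle : cap + 1 ≤ mc := by omega
          by_cases h0 : cs.countP (fun c => PySem.Chars.isupper c) = 0
          · simp [h0]
            intro _
            omega
          · have harith : (cap + 1 + ((cs.countP (fun c => PySem.Chars.isupper c)) : Int) ≤ mc)
                ↔ (cap + ((cs.countP (fun c => PySem.Chars.isupper c) + 1 : Nat) : Int) ≤ mc) := by
              push_cast; omega
            simp [h0, harith]
      · simp [hd, hu, ih]

theorem not_any_digit (l : List Char) :
    (!l.any (fun c => PySem.Chars.isdigit c)) = l.all (fun c => !PySem.Chars.isdigit c) := by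
  induction l with
  | nil => rfl
  | cons c cs ih => simp [List.any_cons, List.all_cons, Bool.not_or, ih]

-- ===== VERDICT (by name: the statements are the Claim_ definitions above) =====
theorem keep_word_py_spec : Claim_unchanged_keep_word_py := by
  intro word min_length max_capital _ hnd
  rw [alt_eq]
  unfold keep_word_py
  by_cases hl : (PySem.Str.len word : Int) < min_length
  · have h1 : decide (min_length ≤ (PySem.Str.len word : Int)) = false := by
      simp only [decide_eq_false_iff_not]; omega
    rw [if_pos hl, h1, Bool.false_and, Bool.false_and]
  · have hge : min_length ≤ (PySem.Str.len word : Int) := by omega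
    have h1 : decide (min_length ≤ (PySem.Str.len word : Int)) = true := by
      simp only [decide_eq_true_eq]; exact hge
    rw [if_neg hl, h1, Bool.true_and, keepLoop_eq, not_any_digit]
    cases hall : word.toList.all (fun c => !PySem.Chars.isdigit c) with
    | false => simp
    | true =>
      simp only [Bool.true_and]
      by_cases h0 : word.toList.countP (fun c => PySem.Chars.isupper c) = 0
      · -- no capitals at all: ¬D_ forces 0 ≤ max_capital, so both sides are true
        have hall2 : (word.toList.all (fun c => !PySem.Chars.isdigit c && !PySem.Chars.isupper c)) = true := by
          rw [List.all_eq_true] at hall ⊢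
          intro c hc
          have hu : PySem.Chars.isupper c = false := by
            have := (List.countP_eq_zero.mp h0) c hc
            simpa using this
          simp [hall c hc, hu]
        have hmc : 0 ≤ max_capital := by
          by_contra hneg
          exact hnd ⟨hge, by omega, hall2⟩
        simp [h0, hmc]
      · have hd1 : decide (word.toList.countP (fun c => PySem.Chars.isupper c) = 0) = false := by
          simpa using h0
        simp
        intro h
        exact absurd (List.countP_eq_zero.mpr (by intro c hc; simp [h c hc])) h0

theorem keep_word_py_changed : Claim_changed_keep_word_py := by
  unfold Claim_changed_keep_word_py; decide

theorem keep_word_py_tight : Claim_exact_keep_word_py := by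
  intro word min_length max_capital _ hd
  obtain ⟨hge, hneg, hall⟩ := hd
  rw [List.all_eq_true] at hall
  rw [alt_eq]
  unfold keep_word_py
  have hl : ¬ ((PySem.Str.len word : Int) < min_length) := by omega
  have hA : keepLoop max_capital word.toList 0 = true := by
    rw [keepLoop_eq]
    have hdg : word.toList.all (fun c => !PySem.Chars.isdigit c) = true := by
      rw [List.all_eq_true]; intro c hc
      have := hall c hc; simp at this; simp [this.1]
    have h0 : word.toList.countP (fun c => PySem.Chars.isupper c) = 0 := by
      rw [List.countP_eq_zero]; intro c hc
      have := hall c hc; simp at this; simp [this.2]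
    simp [hdg, h0]
  have hB : ¬ (((word.toList.countP (fun c => PySem.Chars.isupper c)) : Int) ≤ max_capital) := by
    have h0 : word.toList.countP (fun c => PySem.Chars.isupper c) = 0 := by
      rw [List.countP_eq_zero]; intro c hc
      have := hall c hc; simp at this; simp [this.2]
    rw [h0]; push_cast; omega
  simp [hA, hB]
  simpa [PySem.Str.len] using hge
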